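-- pv_equiv track=rewrite | github.com/ored95/sussex24 | R2G4.py | Solution_Q5
-- ===== SOURCE A (Python) =====
-- from collections import Counter
--
-- def Solution_Q5(arr: list[int]) -> int:
--     """
--     Solution using Counter()
--     """
--     cnt = Counter(arr)      # Use Counter() to get numbers and their frequency
--     num_freq = sorted(cnt.values(), reverse=True)  # Sort dictionary by their frequency (descending order)
--
--     half_size = len(arr) // 2
--     ans = 0
--
--     while half_size > 0:
--         half_size -= num_freq[ans]
--         ans += 1
--
--     return ans
-- ===== SOURCE B (Python) =====
-- def Solution_Q5(arr: list[int]) -> int: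
--     freq = {}
--     for x in arr:
--         freq[x] = freq.get(x, 0) + 1
--     bucket = {}
--     for v in freq.values():
--         bucket[v] = bucket.get(v, 0) + 1
--     remaining = len(arr) // 2
--     ans = 0
--     for f in range(len(arr), 0, -1):
--         c = bucket.get(f, 0)
--         while c > 0 and remaining > 0:
--             remaining -= f
--             ans += 1
--             c -= 1
--     return ans
-- ===== Notes on version B (the rewrite author's own statement) =====
-- stated objective: alternative
-- what changed: Replaces the comparison sort of the frequency list by a counting-sort-style frequency-of-frequency bucket table scanned from the highest possible frequency down, taking set members greedily without ever sorting.
import Mathlib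
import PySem

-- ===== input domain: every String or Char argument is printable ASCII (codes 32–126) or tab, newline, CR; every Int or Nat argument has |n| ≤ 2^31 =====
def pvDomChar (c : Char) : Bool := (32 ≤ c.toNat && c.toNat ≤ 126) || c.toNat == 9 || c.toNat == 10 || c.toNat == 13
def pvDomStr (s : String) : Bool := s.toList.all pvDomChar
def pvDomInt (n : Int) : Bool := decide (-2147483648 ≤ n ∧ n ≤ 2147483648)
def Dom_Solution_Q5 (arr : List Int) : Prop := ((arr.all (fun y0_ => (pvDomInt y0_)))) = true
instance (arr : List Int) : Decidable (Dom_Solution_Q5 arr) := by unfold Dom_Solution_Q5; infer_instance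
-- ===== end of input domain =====

-- B replaces A's comparison sort of the frequency list by a frequency-of-frequency bucket
-- table scanned from the highest possible frequency downwards (counting-sort style).

-- ===== PORT A =====
-- A's while loop 'while half_size > 0: half_size -= num_freq[ans]; ans += 1', walking the
-- sorted frequency list by the growing index 'ans'.  On the [] branch with half > 0 Python
-- would raise IndexError; that state is unreachable because the frequencies sum to len(arr).
def aLoop : List Int → Int → Int → Int
  | [], _, ans => ans
  | f :: rest, half, ans =>
    if half > 0 then aLoop rest (half - f) (ans + 1) else ans

def Solution_Q5 (arr : List Int) : Int :=
  let cnt := PySem.Dict.counter arr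
  let numFreq := PySem.List.sorted cnt.values (fun v => v) true
  aLoop numFreq (PySem.Int.floordiv (arr.length : Int) 2) 0

-- ===== PORT B =====
-- inner 'while c > 0 and remaining > 0': the bucket count c is the fuel.
def bInner (f : Int) : Nat → Int × Int → Int × Int
  | 0, s => s
  | Nat.succ n, (remaining, ans) =>
    if remaining > 0 then bInner f n (remaining - f, ans + 1) else (remaining, ans)

def Solution_Q5_alt (arr : List Int) : Int :=
  let freq := arr.foldl (fun d x => d.insert x (d.getD x 0 + 1)) (PySem.Dict.empty : PySem.Dict Int Int)
  let bucket := freq.values.foldl (fun d v => d.insert v (d.getD v 0 + 1)) (PySem.Dict.empty : PySem.Dict Int Int)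
  let init : Int × Int := (PySem.Int.floordiv (arr.length : Int) 2, 0)
  ((PySem.List.pyRange (arr.length : Int) 0 (-1)).foldl
      (fun s f => bInner f (bucket.getD f 0).toNat s) init).2

-- ===== PRECONDITION & SPEC =====
def Spec_Solution_Q5 (arr : List Int) (out : Int) : Prop := out = Solution_Q5_alt arr
instance (arr : List Int) (out : Int) : Decidable (Spec_Solution_Q5 arr out) := by unfold Spec_Solution_Q5; infer_instance

-- ===== CLAIM (what is proved, stated in full; the proofs are below) =====
def Claim_equal_Solution_Q5 : Prop := ∀ (arr : List Int), Dom_Solution_Q5 arr → Spec_Solution_Q5 arr (Solution_Q5 arr)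

-- ===== LEMMAS AND PROOFS =====

-- the common abstraction: process a list of frequencies, subtracting while remaining > 0
def pairLoop : List Int → Int × Int → Int × Int
  | [], s => s
  | f :: r, (rem, ans) => if rem > 0 then pairLoop r (rem - f, ans + 1) else (rem, ans)

theorem pairLoop_nonpos (l : List Int) (rem ans : Int) (h : ¬ rem > 0) :
    pairLoop l (rem, ans) = (rem, ans) := by
  cases l with
  | nil => rfl
  | cons f r => simp [pairLoop, h]

theorem pairLoop_append (l1 l2 : List Int) (s : Int × Int) :
    pairLoop (l1 ++ l2) s = pairLoop l2 (pairLoop l1 s) := by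
  induction l1 generalizing s with
  | nil => rfl
  | cons f r ih =>
    obtain ⟨rem, ans⟩ := s
    by_cases h : rem > 0
    · simp [pairLoop, h, ih]
    · simp [pairLoop, h, pairLoop_nonpos _ _ _ h]

theorem aLoop_eq_pairLoop (l : List Int) (half ans : Int) :
    aLoop l half ans = (pairLoop l (half, ans)).2 := by
  induction l generalizing half ans with
  | nil => rfl
  | cons f r ih =>
    by_cases h : half > 0
    · simp [aLoop, pairLoop, h, ih]
    · simp [aLoop, pairLoop, h]

theorem bInner_eq_pairLoop (f : Int) (n : Nat) (s : Int × Int) :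
    bInner f n s = pairLoop (List.replicate n f) s := by
  induction n generalizing s with
  | zero => rfl
  | succ n ih =>
    obtain ⟨rem, ans⟩ := s
    by_cases h : rem > 0
    · simp [bInner, List.replicate_succ, pairLoop, h, ih]
    · simp [bInner, List.replicate_succ, pairLoop, h]

theorem foldl_bInner_eq_pairLoop (R : List Int) (c : Int → Nat) (s : Int × Int) :
    R.foldl (fun s f => bInner f (c f) s) s
      = pairLoop (R.flatMap (fun f => List.replicate (c f) f)) s := by
  induction R generalizing s with
  | nil => rfl
  | cons f r ih =>
    simp only [List.foldl_cons]
    rw [ih, List.flatMap_cons, pairLoop_append, bInner_eq_pairLoop]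

theorem count_flatMap_replicate (R : List Int) (c : Int → Nat) (hR : R.Nodup) (x : Int) :
    (R.flatMap (fun f => List.replicate (c f) f)).count x
      = if x ∈ R then c x else 0 := by
  induction R with
  | nil => simp
  | cons f r ih =>
    rcases List.nodup_cons.mp hR with ⟨hf, hr⟩
    by_cases hxf : x = f
    · subst hxf
      simp [List.count_append, ih hr, hf]
    · simp [List.count_append, List.count_replicate, ih hr, hxf, Ne.symm hxf]

theorem pairwise_ge_flatMap_replicate (R : List Int) (c : Int → Nat)
    (hR : R.Pairwise (fun a b => b < a)) :
    (R.flatMap (fun f => List.replicate (c f) f)).Pairwise (fun a b => b ≤ a) := by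
  induction R with
  | nil => simp
  | cons f r ih =>
    rcases List.pairwise_cons.mp hR with ⟨hf, hr⟩
    rw [List.flatMap_cons, List.pairwise_append]
    refine ⟨?_, ih hr, ?_⟩
    · exact List.pairwise_replicate.mpr (Or.inr le_rfl)
    · intro a ha b hb
      have haf : a = f := List.eq_of_mem_replicate ha
      obtain ⟨g, hg, hbg⟩ := List.mem_flatMap.mp hb
      have hbg' : b = g := List.eq_of_mem_replicate hbg
      subst haf; subst hbg'
      exact le_of_lt (hf _ hg)

-- the descending range used by B
theorem nodup_pyRange_countdown (n : Int) : (PySem.List.pyRange n 0 (-1)).Nodup := by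
  rw [PySem.List.pyRange_neg_one_eq_reverse]
  exact List.nodup_reverse.mpr (PySem.List.nodup_pyRange_one _ _)

theorem pairwise_gt_pyRange_countdown (n : Int) :
    (PySem.List.pyRange n 0 (-1)).Pairwise (fun a b => b < a) := by
  rw [PySem.List.pyRange_neg_one_eq_reverse]
  exact List.pairwise_reverse.mpr (PySem.List.pairwise_lt_pyRange_one _ _)

-- values of Counter(arr) are the multiplicities of the distinct elements of arr
theorem mem_counter_values (arr : List Int) (v : Int)
    (hv : v ∈ (PySem.Dict.counter arr).values) : 0 < v ∧ v ≤ (arr.length : Int) := by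
  have hvals : (PySem.Dict.counter arr).values
      = ((PySem.Set.ofList arr : List Int).map (fun k => ((arr.count k : Nat) : Int))) := by
    show ((PySem.Dict.counter arr).items.map Prod.snd) = _
    rw [PySem.Dict.items_counter, List.map_map]
    rfl
  rw [hvals] at hv
  rcases List.mem_map.mp hv with ⟨k, hk, rfl⟩
  have hkmem : k ∈ arr := (PySem.Set.mem_ofList _ _).mp hk
  constructor
  · exact_mod_cast List.count_pos_iff.mpr hkmem
  · exact_mod_cast List.count_le_length

-- the heart: sorted(cnt.values(), reverse=True) equals B's bucket expansion
theorem sorted_eq_flatMap (arr : List Int) :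
    PySem.List.sorted (PySem.Dict.counter arr).values (fun v => v) true
      = (PySem.List.pyRange (arr.length : Int) 0 (-1)).flatMap
          (fun f => List.replicate
              ((PySem.Dict.counter (PySem.Dict.counter arr).values).getD f 0).toNat f) := by
  have hc : ∀ f : Int,
      ((PySem.Dict.counter (PySem.Dict.counter arr).values).getD f 0).toNat
        = (PySem.Dict.counter arr).values.count f := by
    intro f
    rw [PySem.Dict.getD_counter]
    simp
  simp only [hc]
  have hperm : ((PySem.List.pyRange (arr.length : Int) 0 (-1)).flatMap
      (fun f => List.replicate ((PySem.Dict.counter arr).values.count f) f)).Perm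
        (PySem.Dict.counter arr).values := by
    rw [List.perm_iff_count]
    intro x
    rw [count_flatMap_replicate _ _ (nodup_pyRange_countdown _) x]
    by_cases hx : x ∈ PySem.List.pyRange (arr.length : Int) 0 (-1)
    · simp [hx]
    · have hnv : x ∉ (PySem.Dict.counter arr).values := by
        intro hmem
        obtain ⟨h1, h2⟩ := mem_counter_values arr x hmem
        exact hx (PySem.List.mem_pyRange_neg_one.mpr ⟨h1, h2⟩)
      simp [hx, List.count_eq_zero.mpr hnv]
  exact List.Perm.eq_of_pairwise
    (fun a b _ _ h1 h2 => le_antisymm h2 h1)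
    (PySem.List.sorted_pairwise_rev _ _)
    (pairwise_ge_flatMap_replicate _ _ (pairwise_gt_pyRange_countdown _))
    ((PySem.List.sorted_perm _ _ _).trans hperm.symm)

-- ===== VERDICT (by name: the statement is the Claim_ definition above) =====
theorem Solution_Q5_spec : Claim_equal_Solution_Q5 := by
  intro arr _
  show Solution_Q5 arr = Solution_Q5_alt arr
  simp only [Solution_Q5, Solution_Q5_alt]
  rw [PySem.Dict.foldl_insert_getD_add_one_eq_counter,
      PySem.Dict.foldl_insert_getD_add_one_eq_counter]
  rw [foldl_bInner_eq_pairLoop, aLoop_eq_pairLoop, sorted_eq_flatMap]
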